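-- pv_equiv track=rewrite | github.com/YoussefBelhadadji/AiProf | adaptive_writing_system/app/legacy/text_analytics_engine.py | _count_academic_vocabulary
-- ===== SOURCE A (Python) =====
-- from typing import Dict, List, Tuple
--
-- def _count_academic_vocabulary(words: List[str]) -> int:
--     """
--     Count words from academic word list (approximation)
--     """
--     academic_words = {
--         'analyze', 'argue', 'claim', 'conclude', 'consider', 'demonstrate',
--         'develop', 'discuss', 'establish', 'evaluate', 'evidence', 'examine',
--         'explain', 'illustrate', 'imply', 'indicate', 'infer', 'investigate',
--         'maintain', 'method', 'occur', 'propose', 'recognize', 'result',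
--         'significant', 'suggest', 'support', 'theory', 'understand', 'variable',
--         'issue', 'factor', 'process', 'concept', 'principle', 'approach',
--         'assumption', 'benefit', 'challenge', 'constraint', 'context', 'criteria',
--         'derive', 'function', 'hypothesis', 'implication', 'mechanism', 'objective',
--         'outcome', 'parameter', 'perspective', 'phenomenon', 'potential', 'procedure',
--     }
--
--     return sum(1 for w in words if w.lower() in academic_words)
-- ===== SOURCE B (Python) =====
-- from typing import Dict, List, Tuple
--
-- _ACADEMIC_WORDS = (
--     "analyze argue claim conclude consider demonstrate "
--     "develop discuss establish evaluate evidence examine "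
--     "explain illustrate imply indicate infer investigate "
--     "maintain method occur propose recognize result "
--     "significant suggest support theory understand variable "
--     "issue factor process concept principle approach "
--     "assumption benefit challenge constraint context criteria "
--     "derive function hypothesis implication mechanism objective "
--     "outcome parameter perspective phenomenon potential procedure"
-- ).split()
--
-- def _count_academic_vocabulary(words: List[str]) -> int:
--     """Build a lowercase frequency table of the input once, then sum the
--     frequencies of the fixed academic vocabulary."""
--     freq = {}
--     for w in words:
--         lw = w.lower()
--         freq[lw] = freq.get(lw, 0) + 1
--     return sum(freq.get(a, 0) for a in _ACADEMIC_WORDS)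
-- ===== Notes on version B (the rewrite author's own statement) =====
-- stated objective: alternative
-- what changed: B inverts the traversal: it builds a lowercase frequency dictionary of the input in one pass and then sums the frequencies of the 54 fixed academic words (kept as one space-separated string split at import time), instead of testing each input word for set membership.
import Mathlib
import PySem

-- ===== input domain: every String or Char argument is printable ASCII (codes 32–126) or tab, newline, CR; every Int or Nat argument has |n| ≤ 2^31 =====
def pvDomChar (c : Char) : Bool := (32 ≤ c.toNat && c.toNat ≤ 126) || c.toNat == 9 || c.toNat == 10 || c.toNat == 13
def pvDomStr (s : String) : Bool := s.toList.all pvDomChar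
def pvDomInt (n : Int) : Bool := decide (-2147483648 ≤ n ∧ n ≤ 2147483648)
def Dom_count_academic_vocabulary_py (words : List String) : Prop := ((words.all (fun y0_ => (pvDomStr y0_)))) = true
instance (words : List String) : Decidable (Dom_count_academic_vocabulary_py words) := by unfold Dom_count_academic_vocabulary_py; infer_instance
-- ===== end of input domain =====

-- B builds a lowercase frequency dictionary in one pass and sums the frequencies of the fixed academic words (alternative decomposition; same cost).

-- ===== PORT A =====
-- the 54-word academic vocabulary, A's in-function set literal
def academicWordsA : List String :=
  ["analyze", "argue", "claim", "conclude", "consider", "demonstrate",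
   "develop", "discuss", "establish", "evaluate", "evidence", "examine",
   "explain", "illustrate", "imply", "indicate", "infer", "investigate",
   "maintain", "method", "occur", "propose", "recognize", "result",
   "significant", "suggest", "support", "theory", "understand", "variable",
   "issue", "factor", "process", "concept", "principle", "approach",
   "assumption", "benefit", "challenge", "constraint", "context", "criteria",
   "derive", "function", "hypothesis", "implication", "mechanism", "objective",
   "outcome", "parameter", "perspective", "phenomenon", "potential", "procedure"]

-- sum(1 for w in words if w.lower() in academic_words)
def count_academic_vocabulary_py (words : List String) : Int :=
  words.foldl (fun acc w => if academicWordsA.contains (PySem.Str.lower w) then acc + 1 else acc) 0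

-- ===== PORT B =====
-- B's module-level tuple _ACADEMIC_WORDS: one space-separated string literal, .split() at module level
def academicWordsB : List String := PySem.Str.split₀
  ("analyze argue claim conclude consider demonstrate " ++
   "develop discuss establish evaluate evidence examine " ++
   "explain illustrate imply indicate infer investigate " ++
   "maintain method occur propose recognize result " ++
   "significant suggest support theory understand variable " ++
   "issue factor process concept principle approach " ++
   "assumption benefit challenge constraint context criteria " ++
   "derive function hypothesis implication mechanism objective " ++
   "outcome parameter perspective phenomenon potential procedure")

-- freq = {}; for w in words: freq[lw] = freq.get(lw,0)+1 ; then sum freq.get(a,0) over the tuple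
def count_academic_vocabulary_py_alt (words : List String) : Int :=
  let freq : PySem.Dict String Int :=
    words.foldl (fun d w =>
      let lw := PySem.Str.lower w
      d.insert lw (d.getD lw 0 + 1)) PySem.Dict.empty
  academicWordsB.foldl (fun acc a => acc + freq.getD a 0) 0

-- ===== PRECONDITION & SPEC =====
def Spec_count_academic_vocabulary_py (words : List String) (out : Int) : Prop := out = count_academic_vocabulary_py_alt words
instance (words : List String) (out : Int) : Decidable (Spec_count_academic_vocabulary_py words out) := by unfold Spec_count_academic_vocabulary_py; infer_instance

-- ===== CLAIM (what is proved, stated in full; the proofs are below) =====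
def Claim_equal_count_academic_vocabulary_py : Prop := ∀ (words : List String), Dom_count_academic_vocabulary_py words → Spec_count_academic_vocabulary_py words (count_academic_vocabulary_py words)

-- ===== LEMMAS AND PROOFS =====

-- countP of a disjunction of pointwise-disjoint predicates splits into a sum
theorem countP_or_disjoint (l : List String) (p q : String → Bool)
    (h : ∀ x, ¬(p x = true ∧ q x = true)) :
    l.countP (fun x => p x || q x) = l.countP p + l.countP q := by
  induction l with
  | nil => simp
  | cons x l ih =>
    simp only [List.countP_cons, ih]
    by_cases hp : p x = true
    · have hq : q x = false := by
        cases hqv : q x with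
        | false => rfl
        | true => exact absurd ⟨hp, hqv⟩ (h x)
      simp [hp, hq]; omega
    · simp only [Bool.not_eq_true] at hp
      by_cases hq : q x = true
      · simp [hp, hq]; omega
      · simp [hp, hq]

-- summing the multiplicities of the distinct elements of A counts the members of A
theorem sum_count_eq_countP_contains (A : List String) (hA : A.Nodup) (l : List String) :
    (A.map (fun a => l.count a)).sum = l.countP (fun x => A.contains x) := by
  induction A with
  | nil => simp [List.countP_eq_zero.mpr]
  | cons a A ih =>
    have hnotmem : a ∉ A := (List.nodup_cons.mp hA).1
    have hA' : A.Nodup := (List.nodup_cons.mp hA).2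
    have hdisj : ∀ x, ¬((x == a) = true ∧ A.contains x = true) := by
      intro x ⟨h1, h2⟩
      exact hnotmem (by simpa [eq_of_beq h1] using h2)
    have hsplit := countP_or_disjoint l (fun x => x == a) (fun x => A.contains x) hdisj
    simp only [List.map_cons, List.sum_cons, ih hA']
    have : l.countP (fun x => (a :: A).contains x) =
        l.countP (fun x => (x == a) || A.contains x) := by
      apply List.countP_congr
      intro x _
      simp
    rw [this, hsplit, List.count]

theorem academicWordsA_nodup : academicWordsA.Nodup := by decide

-- B's split of the space-separated literal yields exactly A's list
set_option maxRecDepth 4000 in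
theorem academicWordsB_eq_A : academicWordsB = academicWordsA := by decide

-- ===== VERDICT (by name: the statement is the Claim_ definition above) =====
theorem count_academic_vocabulary_py_spec : Claim_equal_count_academic_vocabulary_py := by
  intro words _
  unfold Spec_count_academic_vocabulary_py count_academic_vocabulary_py count_academic_vocabulary_py_alt
  rw [academicWordsB_eq_A]
  -- A side: a 0/1 loop is a countP
  rw [PySem.List.foldl_if_add_one]
  -- B side: the frequency loop is a counter over the lowered words
  have hfreq : (words.foldl (fun d w =>
      d.insert (PySem.Str.lower w) (d.getD (PySem.Str.lower w) 0 + 1)) (PySem.Dict.empty : PySem.Dict String Int))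
      = PySem.Dict.counter (words.map PySem.Str.lower) := by
    rw [← PySem.Dict.foldl_insert_getD_add_one_eq_counter, List.foldl_map]
  rw [hfreq]
  simp only [PySem.Dict.getD_counter]
  rw [PySem.List.foldl_add (g := fun a => ((words.map PySem.Str.lower).count a : Int))]
  have := sum_count_eq_countP_contains academicWordsA academicWordsA_nodup
    (words.map PySem.Str.lower)
  have hcast : ((academicWordsA.map (fun a => (words.map PySem.Str.lower).count a)).sum : Int)
      = (academicWordsA.map (fun a => ((words.map PySem.Str.lower).count a : Int))).sum := by
    rw [Nat.cast_list_sum, List.map_map]; rfl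
  rw [zero_add, zero_add, ← hcast, this, List.countP_map]
  rfl
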